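-- pv_equiv track=rewrite | github.com/thedatamates/ade-bench | scripts_python/analyze.py | migrate_row
-- ===== SOURCE A (Python) =====
-- from typing import Dict, List, Any
--
-- def migrate_field(
--     row: Dict[str, str],
--     experiment_id: str,
--     task_id: str,
--     field_name: str,
--     experiment_migrations: Dict[str, Dict],
--     task_migrations: Dict[str, Dict[str, Dict]],
--     default_migration: Dict[str, Any]
-- ) -> str:
--     """
--     Apply standard migration logic for a field.
--
--     Priority order (highest to lowest):
--     1. Task-specific migration (experiment + task)
--     2. Experiment-specific migration
--     3. Existing value in row
--     4. Default value
--
--     Args: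
--         row: The row data
--         experiment_id: The experiment ID
--         task_id: The task ID
--         field_name: The field to migrate
--         experiment_migrations: Experiment-specific migration overrides
--         task_migrations: Task-specific migration overrides {experiment_id: {task_id: {field: value}}}
--         default_migration: Default values for missing fields
--     """
--     # Check for task-specific migration first (highest priority)
--     if experiment_id in task_migrations:
--         if task_id in task_migrations[experiment_id]:
--             if field_name in task_migrations[experiment_id][task_id]:
--                 return str(task_migrations[experiment_id][task_id][field_name])
--
--     # Check for experiment-specific migration
--     if experiment_id in experiment_migrations and field_name in experiment_migrations[experiment_id]:
--         return str(experiment_migrations[experiment_id][field_name])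
--
--     # Use existing value if present
--     if field_name in row:
--         return str(row[field_name])
--
--     # Fall back to default
--     return str(default_migration.get(field_name, ''))
--
-- def migrate_row(
--     row: Dict[str, str],
--     experiment_id: str,
--     experiment_migrations: Dict[str, Dict],
--     task_migrations: Dict[str, Dict[str, Dict]],
--     default_migration: Dict[str, Any]
-- ) -> Dict[str, str]:
--     """
--     Apply migrations to normalize a row's structure based on experiment and task config.
--     """
--     migrated_row = row.copy()
--     task_id = row.get('task_id', '')
--
--     # Get list of all fields that could be migrated
--     fields_to_migrate = []
--
--     # Add any fields specified in task-specific migrations for this experiment/task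
--     if experiment_id in task_migrations and task_id in task_migrations[experiment_id]:
--         fields_to_migrate.extend(task_migrations[experiment_id][task_id].keys())
--
--     # Add any fields specified in experiment-specific migrations
--     if experiment_id in experiment_migrations:
--         fields_to_migrate.extend(experiment_migrations[experiment_id].keys())
--
--     # Deduplicate
--     fields_to_migrate = list(set(fields_to_migrate))
--
--     # Apply migrations for each field
--     for field_name in fields_to_migrate:
--         migrated_row[field_name] = migrate_field(
--             row, experiment_id, task_id, field_name,
--             experiment_migrations, task_migrations, default_migration
--         )
--
--     # Remove old columns
--     if 'result_num' in migrated_row: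
--         del migrated_row['result_num']
--
--     return migrated_row
-- ===== SOURCE B (Python) =====
-- def migrate_row(row, experiment_id, experiment_migrations, task_migrations, default_migration):
--     migrated_row = row.copy()
--     task_id = row.get('task_id', '')
--     task_over = task_migrations.get(experiment_id, {}).get(task_id, {})
--     exp_over = experiment_migrations.get(experiment_id, {})
--     for k in task_over:
--         migrated_row[k] = str(task_over[k])
--     for k in exp_over:
--         if k not in task_over:
--             migrated_row[k] = str(exp_over[k])
--     migrated_row.pop('result_num', None)
--     return migrated_row
-- ===== Notes on version B (the rewrite author's own statement) =====
-- stated objective: simpler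
-- what changed: Drops the per-field migrate_field helper, the fields_to_migrate list and the set() dedup; instead overlays the task-specific dict first and then the experiment dict (skipping keys the task dict already set), writing each value directly.
import Mathlib
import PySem

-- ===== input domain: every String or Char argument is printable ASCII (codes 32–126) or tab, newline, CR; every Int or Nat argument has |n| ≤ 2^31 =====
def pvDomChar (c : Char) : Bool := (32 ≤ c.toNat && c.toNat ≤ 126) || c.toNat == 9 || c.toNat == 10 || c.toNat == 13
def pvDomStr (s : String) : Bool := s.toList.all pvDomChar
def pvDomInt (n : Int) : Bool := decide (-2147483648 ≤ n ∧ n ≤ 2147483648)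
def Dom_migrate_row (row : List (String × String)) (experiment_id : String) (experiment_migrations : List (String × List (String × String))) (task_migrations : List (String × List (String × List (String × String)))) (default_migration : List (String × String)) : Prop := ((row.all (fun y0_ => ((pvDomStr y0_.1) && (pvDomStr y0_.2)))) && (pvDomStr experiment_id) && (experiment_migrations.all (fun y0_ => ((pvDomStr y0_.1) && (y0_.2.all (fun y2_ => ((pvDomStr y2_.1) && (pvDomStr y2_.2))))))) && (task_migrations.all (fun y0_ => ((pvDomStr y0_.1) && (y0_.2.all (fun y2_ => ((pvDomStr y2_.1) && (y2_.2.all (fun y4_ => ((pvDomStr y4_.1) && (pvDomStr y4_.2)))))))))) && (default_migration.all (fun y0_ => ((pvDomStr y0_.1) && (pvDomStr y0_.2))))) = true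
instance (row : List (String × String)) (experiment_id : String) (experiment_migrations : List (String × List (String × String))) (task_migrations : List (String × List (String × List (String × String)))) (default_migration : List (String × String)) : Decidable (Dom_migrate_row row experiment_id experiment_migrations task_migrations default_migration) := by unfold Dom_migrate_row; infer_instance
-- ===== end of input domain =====

-- ===== PORT A =====
-- B drops the migrate_field helper and the set() dedup, overlaying the two migration dicts
-- directly (simpler decomposition, same values); equivalence is about the return value only.
-- str(v) on a value that is already a str is the identity; all values here are String.

def migrate_field (row : List (String × String)) (experiment_id : String) (task_id : String)
    (field_name : String)
    (experiment_migrations : List (String × List (String × String)))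
    (task_migrations : List (String × List (String × List (String × String))))
    (default_migration : List (String × String)) : String :=
  let tmd := PySem.Dict.mk task_migrations
  let emd := PySem.Dict.mk experiment_migrations
  -- Python's three nested ifs fall through to the later checks; here the later checks are the
  -- else-continuations (fromRow / fromExp), built first so the guard chain reads top-down.
  let fromRow : String :=
    if (PySem.Dict.mk row).contains field_name then (PySem.Dict.mk row).getD field_name ""
    else (PySem.Dict.mk default_migration).getD field_name ""
  let fromExp : String :=
    if emd.contains experiment_id && (PySem.Dict.mk (emd.getD experiment_id [])).contains field_name then
      (PySem.Dict.mk (emd.getD experiment_id [])).getD field_name ""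
    else fromRow
  if tmd.contains experiment_id
      && (PySem.Dict.mk (tmd.getD experiment_id [])).contains task_id
      && (PySem.Dict.mk ((PySem.Dict.mk (tmd.getD experiment_id [])).getD task_id [])).contains field_name then
    (PySem.Dict.mk ((PySem.Dict.mk (tmd.getD experiment_id [])).getD task_id [])).getD field_name ""
  else fromExp

def migrate_row (row : List (String × String)) (experiment_id : String) (experiment_migrations : List (String × List (String × String))) (task_migrations : List (String × List (String × List (String × String)))) (default_migration : List (String × String)) : List (String × String) :=
  let migrated_row := PySem.Dict.mk row                                   -- row.copy()
  let task_id := (PySem.Dict.mk row).getD "task_id" ""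
  let tmd := PySem.Dict.mk task_migrations
  let emd := PySem.Dict.mk experiment_migrations
  let fields_to_migrate : List String := []
  let fields_to_migrate :=
    if tmd.contains experiment_id && (PySem.Dict.mk (tmd.getD experiment_id [])).contains task_id then
      fields_to_migrate ++ (PySem.Dict.mk ((PySem.Dict.mk (tmd.getD experiment_id [])).getD task_id [])).keys
    else fields_to_migrate
  let fields_to_migrate :=
    if emd.contains experiment_id then
      fields_to_migrate ++ (PySem.Dict.mk (emd.getD experiment_id [])).keys
    else fields_to_migrate
  -- list(set(..)): Python's set iteration order is not modelled; first-occurrence order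
  -- (the result is compared as a dict, so the order is immaterial to the Python behaviour)
  let fields_to_migrate := PySem.List.dedup fields_to_migrate
  let migrated_row := fields_to_migrate.foldl
    (fun d f => d.insert f
      (migrate_field row experiment_id task_id f experiment_migrations task_migrations default_migration))
    migrated_row
  let migrated_row :=
    if migrated_row.contains "result_num" then migrated_row.erase "result_num" else migrated_row
  migrated_row.items

-- ===== PORT B =====
def migrate_row_alt (row : List (String × String)) (experiment_id : String) (experiment_migrations : List (String × List (String × String))) (task_migrations : List (String × List (String × List (String × String)))) (default_migration : List (String × String)) : List (String × String) :=
  let migrated_row := PySem.Dict.mk row                                   -- row.copy()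
  let task_id := (PySem.Dict.mk row).getD "task_id" ""
  let task_over := PySem.Dict.mk
    ((PySem.Dict.mk ((PySem.Dict.mk task_migrations).getD experiment_id [])).getD task_id [])
  let exp_over := PySem.Dict.mk ((PySem.Dict.mk experiment_migrations).getD experiment_id [])
  let migrated_row := task_over.keys.foldl
    (fun d k => d.insert k (task_over.getD k "")) migrated_row
  let migrated_row := exp_over.keys.foldl
    (fun d k => if task_over.contains k then d else d.insert k (exp_over.getD k "")) migrated_row
  (migrated_row.erase "result_num").items                                 -- pop('result_num', None)
-- ===== PRECONDITION & SPEC =====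
def Spec_migrate_row (row : List (String × String)) (experiment_id : String) (experiment_migrations : List (String × List (String × String))) (task_migrations : List (String × List (String × List (String × String)))) (default_migration : List (String × String)) (out : List (String × String)) : Prop := out = migrate_row_alt row experiment_id experiment_migrations task_migrations default_migration
instance (row : List (String × String)) (experiment_id : String) (experiment_migrations : List (String × List (String × String))) (task_migrations : List (String × List (String × List (String × String)))) (default_migration : List (String × String)) (out : List (String × String)) : Decidable (Spec_migrate_row row experiment_id experiment_migrations task_migrations default_migration out) := by unfold Spec_migrate_row; infer_instance

-- ===== CLAIM (what is proved, stated in full; the proofs are below) =====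
def Claim_equal_migrate_row : Prop := ∀ (row : List (String × String)) (experiment_id : String) (experiment_migrations : List (String × List (String × String))) (task_migrations : List (String × List (String × List (String × String)))) (default_migration : List (String × String)), Dom_migrate_row row experiment_id experiment_migrations task_migrations default_migration → Spec_migrate_row row experiment_id experiment_migrations task_migrations default_migration (migrate_row row experiment_id experiment_migrations task_migrations default_migration)

-- ===== LEMMAS AND PROOFS =====

theorem pv_bool_false {b : Bool} (h : ¬ b = true) : b = false := by cases b <;> simp_all

-- a key already present commutes past an insert of a different key (full Dict equality)
theorem pv_insert_comm {κ ν : Type} [BEq κ] [LawfulBEq κ] (d : PySem.Dict κ ν) {x y : κ} (v w : ν)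
    (hxy : x ≠ y) (hx : d.contains x = true) :
    (d.insert y w).insert x v = (d.insert x v).insert y w := by
  apply PySem.Dict.ext
  have hx' : (d.insert y w).contains x = true := by
    rw [PySem.Dict.contains_insert]; simp [hx]
  by_cases hy : d.contains y = true
  · have hy' : (d.insert x v).contains y = true := by
      rw [PySem.Dict.contains_insert]; simp [hy]
    rw [PySem.Dict.items_insert_of_contains _ v hx',
        PySem.Dict.items_insert_of_contains _ w hy,
        PySem.Dict.items_insert_of_contains _ w hy',
        PySem.Dict.items_insert_of_contains _ v hx]
    simp only [List.map_map]
    apply List.map_congr_left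
    intro p _
    by_cases hpx : p.1 = x <;> by_cases hpy : p.1 = y <;>
      simp_all [Function.comp, hxy, Ne.symm hxy]
  · have hy0 : d.contains y = false := by simpa using hy
    have hy' : (d.insert x v).contains y = false := by
      rw [PySem.Dict.contains_insert]; simp [hy0, hxy, Ne.symm hxy]
    rw [PySem.Dict.items_insert_of_contains _ v hx',
        PySem.Dict.items_insert_of_not_contains _ w hy0,
        PySem.Dict.items_insert_of_not_contains _ w hy',
        PySem.Dict.items_insert_of_contains _ v hx]
    simp [Ne.symm hxy, hxy]

-- the property "inserting (x, v x) changes nothing" survives one keyed insert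
theorem pv_step_preserve {κ ν : Type} [BEq κ] [LawfulBEq κ] (v : κ → ν) (d : PySem.Dict κ ν)
    {x : κ} (h : d.insert x (v x) = d) (k : κ) :
    ((d.insert k (v k)).insert x (v x)) = d.insert k (v k) := by
  by_cases hk : k = x
  · subst hk; rw [PySem.Dict.insert_insert_self]
  · have hx : d.contains x = true := by
      by_contra hc
      have hc' : d.contains x = false := pv_bool_false hc
      have hitems := PySem.Dict.items_insert_of_not_contains d (v x) hc'
      rw [h] at hitems
      have := congrArg List.length hitems
      simp at this
    rw [pv_insert_comm d (v x) (v k) (fun he => hk he.symm) hx, h]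

-- …and hence survives a whole keyed-insert fold
theorem pv_foldl_preserve {κ ν : Type} [BEq κ] [LawfulBEq κ] (v : κ → ν) (L : List κ)
    (d : PySem.Dict κ ν) {x : κ} (h : d.insert x (v x) = d) :
    (L.foldl (fun d k => d.insert k (v k)) d).insert x (v x)
      = L.foldl (fun d k => d.insert k (v k)) d := by
  induction L generalizing d with
  | nil => simpa using h
  | cons a L ih => simp only [List.foldl_cons]; exact ih _ (pv_step_preserve v d h a)

-- after folding keyed inserts over L, re-inserting any member of L is a no-op
theorem pv_foldl_mem_fix {κ ν : Type} [BEq κ] [LawfulBEq κ] (v : κ → ν) (L : List κ)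
    (d : PySem.Dict κ ν) {x : κ} (hx : x ∈ L) :
    (L.foldl (fun d k => d.insert k (v k)) d).insert x (v x)
      = L.foldl (fun d k => d.insert k (v k)) d := by
  induction L generalizing d with
  | nil => cases hx
  | cons a L ih =>
    simp only [List.foldl_cons]
    rcases List.mem_cons.mp hx with h | h
    · subst h
      exact pv_foldl_preserve v L _ (PySem.Dict.insert_insert_self d x (v x) (v x))
    · exact ih _ h

-- folding keyed inserts over the first-occurrence dedup of L = folding over L itself
theorem pv_foldl_setfold {κ ν : Type} [BEq κ] [LawfulBEq κ] (v : κ → ν) (L s : List κ)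
    (d : PySem.Dict κ ν) :
    (L.foldl PySem.Set.add s).foldl (fun d k => d.insert k (v k)) d
      = L.foldl (fun d k => d.insert k (v k)) (s.foldl (fun d k => d.insert k (v k)) d) := by
  induction L generalizing s d with
  | nil => rfl
  | cons a L ih =>
    simp only [List.foldl_cons]
    rw [ih]
    congr 1
    by_cases hc : PySem.Set.contains s a = true
    · have ha : a ∈ s := List.contains_iff_mem.mp hc
      rw [show PySem.Set.add s a = s by unfold PySem.Set.add; rw [if_pos hc]]
      exact (pv_foldl_mem_fix v s d ha).symm
    · rw [show PySem.Set.add s a = s ++ [a] by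
        simp only [PySem.Set.add]; rw [if_neg hc]]
      rw [List.foldl_append]
      rfl

theorem pv_dedup_foldl {κ ν : Type} [BEq κ] [LawfulBEq κ] (v : κ → ν) (L : List κ)
    (d : PySem.Dict κ ν) :
    (PySem.List.dedup L).foldl (fun d k => d.insert k (v k)) d
      = L.foldl (fun d k => d.insert k (v k)) d := by
  rw [PySem.List.dedup_eq_ofList, PySem.Set.ofList_eq_foldl, pv_foldl_setfold]
  rfl

-- a conditional-skip fold equals the unconditional fold when every skipped insert is a no-op
theorem pv_skip_fold {κ ν : Type} [BEq κ] [LawfulBEq κ] (v : κ → ν) (c : κ → Bool) (E : List κ)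
    (d : PySem.Dict κ ν) (h : ∀ k, c k = true → d.insert k (v k) = d) :
    E.foldl (fun d k => if c k then d else d.insert k (v k)) d
      = E.foldl (fun d k => d.insert k (v k)) d := by
  induction E generalizing d with
  | nil => rfl
  | cons a E ih =>
    simp only [List.foldl_cons]
    by_cases ha : c a = true
    · rw [if_pos ha, h a ha]
      exact ih _ h
    · rw [if_neg ha]
      exact ih _ (fun k hk => pv_step_preserve v d (h k hk) a)

-- a Dict built from the empty list contains nothing; a nonempty lookup means the key is there
theorem pv_contains_ne_nil {ν : Type} {l : List (String × ν)} {k : String}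
    (h : (PySem.Dict.mk l).contains k = true) : l ≠ [] := by
  intro he; subst he; simp [PySem.Dict.contains_mk] at h

theorem pv_getD_ne_nil {κ ν : Type} [BEq κ] (d : PySem.Dict κ (List ν)) {k : κ}
    (h : d.getD k [] ≠ []) : d.contains k = true := by
  by_contra hc
  exact h (PySem.Dict.getD_of_not_contains d [] (pv_bool_false hc))

theorem pv_erase_of_not_contains {κ ν : Type} [BEq κ] (d : PySem.Dict κ ν) {k : κ}
    (h : d.contains k = false) : d.erase k = d := by
  apply PySem.Dict.ext
  show d.items.filter (fun p => !p.1 == k) = d.items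
  rw [List.filter_eq_self]
  have h' : d.items.any (fun p => p.1 == k) = false := h
  simp only [List.any_eq_false] at h'
  intro p hp
  simpa using h' p hp

-- the shared core: A's dedup-and-migrate fold equals B's two overlay passes
theorem pv_core (d0 task_over exp_over : PySem.Dict String String) (v : String → String)
    (hT : ∀ f, task_over.contains f = true → v f = task_over.getD f "")
    (hE : ∀ f, task_over.contains f = false → f ∈ exp_over.keys → v f = exp_over.getD f "") :
    (PySem.List.dedup (task_over.keys ++ exp_over.keys)).foldl
        (fun d f => d.insert f (v f)) d0
      = exp_over.keys.foldl
          (fun d k => if task_over.contains k then d else d.insert k (exp_over.getD k ""))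
          (task_over.keys.foldl (fun d k => d.insert k (task_over.getD k "")) d0) := by
  rw [pv_dedup_foldl, List.foldl_append]
  have hTfold : task_over.keys.foldl (fun d f => d.insert f (v f)) d0
      = task_over.keys.foldl (fun d k => d.insert k (task_over.getD k "")) d0 := by
    apply PySem.List.foldl_congr_mem
    intro acc k hk
    rw [hT k ((PySem.Dict.contains_iff_mem_keys task_over k).mpr hk)]
  rw [hTfold]
  have hskip : exp_over.keys.foldl
        (fun d k => if task_over.contains k then d else d.insert k (exp_over.getD k "")) (task_over.keys.foldl (fun d k => d.insert k (task_over.getD k "")) d0)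
      = exp_over.keys.foldl
        (fun d k => if task_over.contains k then d else d.insert k (v k))
        (task_over.keys.foldl (fun d k => d.insert k (task_over.getD k "")) d0) := by
    apply PySem.List.foldl_congr_mem
    intro acc k hk
    by_cases hc : task_over.contains k = true
    · simp [hc]
    · have hc0 : task_over.contains k = false := by simpa using hc
      rw [hE k hc0 hk]
  rw [hskip]
  rw [pv_skip_fold (v := v) (c := fun k => task_over.contains k)]
  intro k hk
  have hkmem : k ∈ task_over.keys := (PySem.Dict.contains_iff_mem_keys task_over k).mp hk
  have hfix := pv_foldl_mem_fix (fun k => task_over.getD k "") task_over.keys d0 hkmem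
  rw [hT k hk]
  exact hfix

-- A side of the core: migrate_field on a key of the task overlay is the task value …
theorem pv_hT (row : List (String × String)) (experiment_id task_id : String)
    (experiment_migrations : List (String × List (String × String)))
    (task_migrations : List (String × List (String × List (String × String))))
    (default_migration : List (String × String)) (f : String)
    (hc : (PySem.Dict.mk ((PySem.Dict.mk ((PySem.Dict.mk task_migrations).getD experiment_id [])).getD task_id [])).contains f = true) :
    migrate_field row experiment_id task_id f experiment_migrations task_migrations default_migration
      = (PySem.Dict.mk ((PySem.Dict.mk ((PySem.Dict.mk task_migrations).getD experiment_id [])).getD task_id [])).getD f "" := by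
  have hl2 := pv_contains_ne_nil hc
  have hcb := pv_getD_ne_nil _ hl2
  have hl1 := pv_contains_ne_nil hcb
  have hca := pv_getD_ne_nil _ hl1
  simp only [migrate_field, hca, hcb, hc, Bool.and_self, Bool.true_and, if_true]

-- … and on a fresh key of the experiment overlay it is the experiment value
theorem pv_hE (row : List (String × String)) (experiment_id task_id : String)
    (experiment_migrations : List (String × List (String × String)))
    (task_migrations : List (String × List (String × List (String × String))))
    (default_migration : List (String × String)) (f : String)
    (hc : (PySem.Dict.mk ((PySem.Dict.mk ((PySem.Dict.mk task_migrations).getD experiment_id [])).getD task_id [])).contains f = false)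
    (hf : f ∈ (PySem.Dict.mk ((PySem.Dict.mk experiment_migrations).getD experiment_id [])).keys) :
    migrate_field row experiment_id task_id f experiment_migrations task_migrations default_migration
      = (PySem.Dict.mk ((PySem.Dict.mk experiment_migrations).getD experiment_id [])).getD f "" := by
  have hce : (PySem.Dict.mk ((PySem.Dict.mk experiment_migrations).getD experiment_id [])).contains f = true :=
    (PySem.Dict.contains_iff_mem_keys _ f).mpr hf
  have hl1 := pv_contains_ne_nil hce
  have hca := pv_getD_ne_nil _ hl1
  simp only [migrate_field, hc, hca, hce, Bool.and_false, Bool.and_true, Bool.true_and,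
    Bool.false_eq_true, if_false, if_true]

-- when A's guard chain is false the corresponding overlay dict is empty
theorem pv_task_nil (experiment_id task_id : String)
    (task_migrations : List (String × List (String × List (String × String))))
    (hc : ¬ ((PySem.Dict.mk task_migrations).contains experiment_id
          && (PySem.Dict.mk ((PySem.Dict.mk task_migrations).getD experiment_id [])).contains task_id) = true) :
    (PySem.Dict.mk ((PySem.Dict.mk task_migrations).getD experiment_id [])).getD task_id [] = [] := by
  rw [Bool.and_eq_true, not_and_or] at hc
  rcases hc with h | h
  · have h0 : (PySem.Dict.mk task_migrations).contains experiment_id = false := pv_bool_false h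
    rw [PySem.Dict.getD_of_not_contains _ [] h0]
    apply PySem.Dict.getD_of_not_contains
    simp [PySem.Dict.contains_mk]
  · exact PySem.Dict.getD_of_not_contains _ [] (pv_bool_false h)

theorem pv_exp_nil (experiment_id : String)
    (experiment_migrations : List (String × List (String × String)))
    (hc : ¬ (PySem.Dict.mk experiment_migrations).contains experiment_id = true) :
    (PySem.Dict.mk experiment_migrations).getD experiment_id [] = [] :=
  PySem.Dict.getD_of_not_contains _ [] (pv_bool_false hc)

theorem pv_erase_items (d : PySem.Dict String String) :
    (if d.contains "result_num" = true then d.erase "result_num" else d).items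
      = (d.erase "result_num").items := by
  by_cases h : d.contains "result_num" = true
  · rw [if_pos h]
  · rw [if_neg h, pv_erase_of_not_contains _ (pv_bool_false h)]

-- ===== VERDICT (by name: the statement is the Claim_ definition above) =====
theorem migrate_row_spec : Claim_equal_migrate_row := by
  intro row experiment_id experiment_migrations task_migrations default_migration _hdom
  unfold Spec_migrate_row
  simp only [migrate_row, migrate_row_alt]
  have hcore := pv_core
    (PySem.Dict.mk row)
    (PySem.Dict.mk ((PySem.Dict.mk ((PySem.Dict.mk task_migrations).getD experiment_id [])).getD ((PySem.Dict.mk row).getD "task_id" "") []))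
    (PySem.Dict.mk ((PySem.Dict.mk experiment_migrations).getD experiment_id []))
    (fun f => migrate_field row experiment_id ((PySem.Dict.mk row).getD "task_id" "") f
        experiment_migrations task_migrations default_migration)
    (fun f hc => pv_hT row experiment_id _ experiment_migrations task_migrations default_migration f hc)
    (fun f hc hf => pv_hE row experiment_id _ experiment_migrations task_migrations default_migration f hc hf)
  by_cases hc1 : ((PySem.Dict.mk task_migrations).contains experiment_id
      && (PySem.Dict.mk ((PySem.Dict.mk task_migrations).getD experiment_id [])).contains
          ((PySem.Dict.mk row).getD "task_id" "")) = true <;>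
  by_cases hc2 : (PySem.Dict.mk experiment_migrations).contains experiment_id = true
  · -- both overlays present
    rw [if_pos hc1, if_pos hc2]
    simp only [List.nil_append]
    rw [hcore]
    exact pv_erase_items _
  · -- only the task overlay
    rw [pv_exp_nil experiment_id experiment_migrations hc2] at hcore ⊢
    rw [if_pos hc1, if_neg hc2]
    simp only [PySem.Dict.keys_mk, List.map_nil, List.foldl_nil, List.append_nil,
      List.nil_append] at hcore ⊢
    rw [hcore]
    exact pv_erase_items _
  · -- only the experiment overlay
    rw [pv_task_nil experiment_id _ task_migrations hc1] at hcore ⊢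
    rw [if_neg hc1, if_pos hc2]
    simp only [PySem.Dict.keys_mk, List.map_nil, List.foldl_nil, List.append_nil,
      List.nil_append, PySem.Dict.contains_mk, List.any_nil, Bool.false_eq_true,
      if_false] at hcore ⊢
    rw [hcore]
    exact pv_erase_items _
  · -- neither overlay
    rw [pv_task_nil experiment_id _ task_migrations hc1] at hcore ⊢
    rw [pv_exp_nil experiment_id experiment_migrations hc2] at hcore ⊢
    rw [if_neg hc1, if_neg hc2]
    simp only [PySem.Dict.keys_mk, List.map_nil, List.foldl_nil, List.append_nil,
      List.nil_append, PySem.Dict.contains_mk, List.any_nil, Bool.false_eq_true,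
      if_false] at hcore ⊢
    rw [hcore]
    exact pv_erase_items _
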